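-- pv_equiv track=rewrite | github.com/pypi-data/pypi-mirror-364 | packages/q2data2docx/q2data2docx-0.1.38.tar.gz/q2data2docx-0.1.38/q2data2docx/q2data2docx.py | cleanPar
-- ===== SOURCE A (Python) =====
-- def cleanPar(parList):  # clean paragraph dummy tags
--     rez = []
--     dxTmp = ""
--     for x in parList:
--         co = x.count("#")
--         if x.startswith("<"):
--             if not dxTmp:
--                 rez.append(x)
--         elif dxTmp:
--             dxTmp += x
--             if dxTmp.count("#") % 2 == 0:
--                 rez.append(dxTmp)
--                 dxTmp = ""
--         elif co % 2 == 0: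
--             rez.append(x)
--         elif co:
--             dxTmp += x
--         else:
--             rez.append(x)
--     return "".join(rez)
-- ===== SOURCE B (Python) =====
-- def cleanPar(parList):  # keep/drop fragments with a parity bit; truncate unmatched tail; join once
--     # Insight: the merged buffers only get concatenated into the result, so grouping is
--     # irrelevant — it suffices to decide which fragments survive. A fragment is dropped
--     # iff it is a '<'-fragment seen while the running '#' parity is odd, or it belongs
--     # to a trailing run whose parity never closes (removed by one truncation at the end).
--     out = []
--     parity = 0
--     run_start = 0
--     for x in parList:
--         if parity == 0:
--             if x.startswith("<") or x.count("#") % 2 == 0: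
--                 out.append(x)
--             else:
--                 run_start = len(out)
--                 out.append(x)
--                 parity = 1
--         elif not x.startswith("<"):
--             out.append(x)
--             parity ^= x.count("#") & 1
--     if parity:
--         del out[run_start:]
--     return "".join(out)
-- ===== Notes on version B (the rewrite author's own statement) =====
-- stated objective: alternative
-- what changed: B never builds A's intermediate merged-buffer strings: it keeps a one-bit running '#' parity, collects surviving fragments in a list, removes an unmatched trailing run by a single truncation at the end, and concatenates once with join.
import Mathlib
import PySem

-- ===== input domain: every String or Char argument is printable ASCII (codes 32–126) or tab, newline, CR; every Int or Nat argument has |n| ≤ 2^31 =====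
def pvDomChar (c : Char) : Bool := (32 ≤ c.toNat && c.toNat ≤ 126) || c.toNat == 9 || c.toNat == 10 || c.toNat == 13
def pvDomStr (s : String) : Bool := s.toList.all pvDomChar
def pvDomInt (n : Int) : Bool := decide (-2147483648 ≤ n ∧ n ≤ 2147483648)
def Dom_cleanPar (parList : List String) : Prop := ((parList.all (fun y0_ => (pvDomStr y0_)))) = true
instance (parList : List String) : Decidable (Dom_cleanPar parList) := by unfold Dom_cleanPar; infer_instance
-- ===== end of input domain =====

-- B never builds A's intermediate merged-buffer strings: it keeps a parity bit, collects the
-- surviving fragments, truncates an unmatched trailing run once, and joins once (alternative).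

-- ===== PORT A =====
-- one iteration of A's for-loop: state = (rez, dxTmp)
def cleanParStep (st : List String × String) (x : String) : List String × String :=
  let co := PySem.Str.count x "#"
  if PySem.Str.startswith x "<" then
    (if st.2 == "" then (st.1 ++ [x], st.2) else st)
  else if st.2 == "" then
    (if co % 2 == 0 then (st.1 ++ [x], st.2)
     else if co ≠ 0 then (st.1, st.2 ++ x)
     else (st.1 ++ [x], st.2))
  else
    (let d := st.2 ++ x
     if PySem.Str.count d "#" % 2 == 0 then (st.1 ++ [d], "") else (st.1, d))

def cleanPar (parList : List String) : String :=
  let st := parList.foldl cleanParStep ([], "")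
  PySem.Str.join "" st.1

-- ===== PORT B =====
-- one iteration of Source B's for-loop: state = (out, parity, run_start)
def cleanParAltStep (st : List String × Nat × Nat) (x : String) : List String × Nat × Nat :=
  if st.2.1 == 0 then
    if PySem.Str.startswith x "<" || PySem.Str.count x "#" % 2 == 0 then
      (st.1 ++ [x], st.2.1, st.2.2)
    else
      (st.1 ++ [x], 1, st.1.length)
  else if PySem.Str.startswith x "<" = false then
    (st.1 ++ [x], st.2.1 ^^^ (PySem.Str.count x "#" &&& 1), st.2.2)
  else st

-- 'if parity: del out[run_start:]' = keep out.take run_start; then one join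
def cleanPar_alt (parList : List String) : String :=
  let st := parList.foldl cleanParAltStep ([], 0, 0)
  PySem.Str.join "" (if st.2.1 == 0 then st.1 else st.1.take st.2.2)

-- ===== PRECONDITION & SPEC =====
def Spec_cleanPar (parList : List String) (out : String) : Prop := out = cleanPar_alt parList
instance (parList : List String) (out : String) : Decidable (Spec_cleanPar parList out) := by unfold Spec_cleanPar; infer_instance

-- ===== CLAIM (what is proved, stated in full; the proofs are below) =====
def Claim_equal_cleanPar : Prop := ∀ (parList : List String), Dom_cleanPar parList → Spec_cleanPar parList (cleanPar parList)

-- ===== LEMMAS AND PROOFS =====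

-- single-char '#' count is the List.count of the character
theorem countGo_single (c : Char) : ∀ (fuel : Nat) (cs : List Char) (acc : Nat),
    cs.length ≤ fuel → PySem.Chars.count.go [c] fuel cs acc = acc + cs.count c := by
  intro fuel
  induction fuel with
  | zero =>
    intro cs acc h
    have : cs = [] := List.length_eq_zero_iff.mp (Nat.le_zero.mp h)
    subst this; simp [PySem.Chars.count.go]
  | succ n ih =>
    intro cs acc h
    cases cs with
    | nil => simp [PySem.Chars.count.go]
    | cons hd t =>
      rw [show PySem.Chars.count.go [c] (n+1) (hd :: t) acc =
          (if [c].isPrefixOf (hd :: t) then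
            PySem.Chars.count.go [c] n (List.drop [c].length (hd :: t)) (acc + 1)
          else PySem.Chars.count.go [c] n t acc) from rfl]
      have hpre : [c].isPrefixOf (hd :: t) = (c == hd) := by simp [List.isPrefixOf]
      rw [hpre]
      by_cases hc : c = hd
      · subst hc
        simp only [beq_self_eq_true, if_pos, List.length_cons]
        rw [show List.drop ([].length + 1) (c :: t) = t from rfl]
        rw [ih t (acc + 1) (by simpa using h)]
        simp
        omega
      · rw [if_neg (by simp [hc])]
        rw [ih t acc (by simpa using h)]
        have hbc : (hd == c) = false := by
          simp only [beq_eq_false_iff_ne, ne_eq]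
          exact fun e => hc e.symm
        simp [List.count_cons, hbc]

theorem charsCount_hash (cs : List Char) : PySem.Chars.count cs ['#'] = cs.count '#' := by
  rw [PySem.Chars.count]
  rw [if_neg (by simp)]
  rw [countGo_single '#' cs.length cs 0 (le_refl _)]
  omega

theorem strCount_hash (s : String) : PySem.Str.count s "#" = s.toList.count '#' := by
  rw [PySem.Str.count_eq]
  exact charsCount_hash s.toList

theorem str_ne_empty_iff (s : String) : (s == "") = false ↔ s.toList ≠ [] := by
  simp [beq_eq_false_iff_ne, String.toList_eq_nil_iff]

theorem append_ne_empty (a b : String) (h : (a == "") = false) : ((a ++ b) == "") = false := by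
  rw [str_ne_empty_iff] at h ⊢
  simp only [String.toList_append, ne_eq, List.append_eq_nil_iff, not_and]
  intro h1 _; exact h h1

theorem join_empty_eq_flatten : ∀ (css : List (List Char)), PySem.Chars.join [] css = css.flatten := by
  intro css
  induction css with
  | nil => rfl
  | cons c cs ih =>
    show List.intercalate [] (c :: cs) = _
    simp only [PySem.Chars.join, List.intercalate] at ih
    cases cs with
    | nil => simp [List.intercalate]
    | cons d ds =>
      simp only [List.intercalate, List.intersperse, List.flatten] at ih ⊢
      simpa using ih

-- the character stream a fragment list joins to
def joinL (l : List String) : List Char := (l.map String.toList).flatten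

theorem joinL_append (l : List String) (x : String) :
    joinL (l ++ [x]) = joinL l ++ x.toList := by simp [joinL]

theorem toList_join_empty (l : List String) :
    (PySem.Str.join "" l).toList = joinL l := by
  rw [PySem.Str.toList_join]
  show PySem.Chars.join [] _ = _
  rw [join_empty_eq_flatten]; rfl

-- the coupling invariant between A's state (rez, dxTmp) and B's state (out, parity, run_start)
def CPInv (a : List String × String) (b : List String × Nat × Nat) : Prop :=
  (a.2 = "" ∧ b.2.1 = 0 ∧ joinL b.1 = joinL a.1)
  ∨ ((a.2 == "") = false ∧ b.2.1 = 1 ∧ PySem.Str.count a.2 "#" % 2 = 1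
     ∧ b.2.2 ≤ b.1.length
     ∧ joinL (b.1.take b.2.2) = joinL a.1
     ∧ joinL b.1 = joinL a.1 ++ a.2.toList)

theorem Inv_step (a : List String × String) (b : List String × Nat × Nat) (x : String)
    (h : CPInv a b) : CPInv (cleanParStep a x) (cleanParAltStep b x) := by
  obtain ⟨rez, d⟩ := a
  obtain ⟨out, p, rs⟩ := b
  rcases h with ⟨hd, hp, hj⟩ | ⟨hd, hp, hodd, hrs, hjt, hj⟩
  · -- dxTmp empty, parity 0
    simp only at hd hp hj
    subst hd hp
    by_cases hs : PySem.Chars.startswith x.toList ['<'] = true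
    · have hA : cleanParStep (rez, "") x = (rez ++ [x], "") := by
        simp [cleanParStep, hs]
      have hB : cleanParAltStep (out, 0, rs) x = (out ++ [x], 0, rs) := by
        simp [cleanParAltStep, hs]
      rw [hA, hB]
      exact Or.inl ⟨rfl, rfl, by simp [joinL_append, hj]⟩
    · by_cases he : PySem.Chars.count x.toList ['#'] % 2 = 0
      · have hA : cleanParStep (rez, "") x = (rez ++ [x], "") := by
          simp [cleanParStep, hs, he]
        have hB : cleanParAltStep (out, 0, rs) x = (out ++ [x], 0, rs) := by
          simp [cleanParAltStep, hs, he]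
        rw [hA, hB]
        exact Or.inl ⟨rfl, rfl, by simp [joinL_append, hj]⟩
      · -- odd opener
        have hx0 : ¬ PySem.Chars.count x.toList ['#'] = 0 := by
          intro h0; rw [h0] at he; simp at he
        have hA : cleanParStep (rez, "") x = (rez, x) := by
          simp [cleanParStep, hs, he, hx0]
        have hB : cleanParAltStep (out, 0, rs) x = (out ++ [x], 1, out.length) := by
          simp [cleanParAltStep, hs, he]
        rw [hA, hB]
        right
        refine ⟨?_, rfl, ?_, by simp, by simp [hj], by simp [joinL_append, hj]⟩
        · rw [str_ne_empty_iff]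
          intro hl; rw [charsCount_hash, hl] at he; simp at he
        · rw [PySem.Str.count_eq]
          rcases Nat.mod_two_eq_zero_or_one (PySem.Chars.count x.toList ['#']) with h | h
          · exact absurd h he
          · exact h
  · -- dxTmp nonempty, parity 1
    simp only at hd hp hodd hrs hjt hj
    subst hp
    have hoddL : d.toList.count '#' % 2 = 1 := by
      rw [strCount_hash] at hodd; exact hodd
    by_cases hs : PySem.Chars.startswith x.toList ['<'] = true
    · have hA : cleanParStep (rez, d) x = (rez, d) := by
        simp [cleanParStep, hs, hd]
      have hB : cleanParAltStep (out, 1, rs) x = (out, 1, rs) := by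
        simp [cleanParAltStep, hs]
      rw [hA, hB]
      exact Or.inr ⟨hd, rfl, hodd, hrs, hjt, hj⟩
    · by_cases he : PySem.Chars.count (d.toList ++ x.toList) ['#'] % 2 = 0
      · -- run closes
        have heL : (d.toList.count '#' + x.toList.count '#') % 2 = 0 := by
          rw [charsCount_hash, List.count_append] at he; exact he
        have hxand : PySem.Chars.count x.toList ['#'] &&& 1 = 1 := by
          rw [Nat.and_one_is_mod, charsCount_hash]; omega
        have hA : cleanParStep (rez, d) x = (rez ++ [d ++ x], "") := by
          simp [cleanParStep, hs, hd, he]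
        have hB : cleanParAltStep (out, 1, rs) x = (out ++ [x], 0, rs) := by
          simp [cleanParAltStep, hs, hxand]
        rw [hA, hB]
        exact Or.inl ⟨rfl, rfl, by simp [joinL_append, hj, String.toList_append]⟩
      · -- run stays open
        have heL : (d.toList.count '#' + x.toList.count '#') % 2 = 1 := by
          rw [charsCount_hash, List.count_append] at he
          omega
        have hxand : PySem.Chars.count x.toList ['#'] &&& 1 = 0 := by
          rw [Nat.and_one_is_mod, charsCount_hash]; omega
        have hA : cleanParStep (rez, d) x = (rez, d ++ x) := by
          simp [cleanParStep, hs, hd, he]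
        have hB : cleanParAltStep (out, 1, rs) x = (out ++ [x], 1, rs) := by
          simp [cleanParAltStep, hs, hxand]
        rw [hA, hB]
        refine Or.inr ⟨append_ne_empty d x hd, rfl, ?_,
          by simpa using Nat.le_succ_of_le hrs, ?_, ?_⟩
        · rw [strCount_hash]
          simp only [String.toList_append, List.count_append]
          exact heL
        · show joinL (List.take rs (out ++ [x])) = joinL rez
          rw [List.take_append_of_le_length hrs]; exact hjt
        · simp [joinL_append, hj, String.toList_append]

theorem Inv_fold (l : List String) : ∀ (a : List String × String) (b : List String × Nat × Nat),
    CPInv a b → CPInv (l.foldl cleanParStep a) (l.foldl cleanParAltStep b) := by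
  induction l with
  | nil => intro a b h; exact h
  | cons x xs ih => intro a b h; exact ih _ _ (Inv_step a b x h)

-- ===== VERDICT (by name: the statement is the Claim_ definition above) =====
theorem cleanPar_spec : Claim_equal_cleanPar := by
  intro parList _
  show cleanPar parList = cleanPar_alt parList
  have h := Inv_fold parList ([], "") ([], 0, 0) (Or.inl ⟨rfl, rfl, rfl⟩)
  apply String.ext
  rw [show cleanPar parList = PySem.Str.join "" (parList.foldl cleanParStep ([], "")).1 from rfl]
  rw [show cleanPar_alt parList = PySem.Str.join ""
      (let st := parList.foldl cleanParAltStep ([], 0, 0)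
       if st.2.1 == 0 then st.1 else st.1.take st.2.2) from rfl]
  rw [toList_join_empty, toList_join_empty]
  rcases h with ⟨_, hp, hj⟩ | ⟨_, hp, _, _, hjt, _⟩
  · rw [if_pos (by simp [hp])]
    exact hj.symm
  · rw [if_neg (by simp [hp])]
    exact hjt.symm
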